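-- pv_equiv track=rewrite | github.com/princessupload/lotto-news | daily_email_report.py | get_position_pools
-- ===== SOURCE A (Python) =====
-- from collections import Counter
--
-- def get_position_pools(draws, window=100):
--     """Get suggested number pools per position from recent draws."""
--     if len(draws) < window:
--         window = len(draws)
--
--     recent = draws[:window]
--     pos_freq = {i: Counter() for i in range(5)}
--
--     for draw in recent:
--         main = sorted(draw.get('main', []))
--         for i, num in enumerate(main):
--             pos_freq[i][num] += 1
--
--     pools = {}
--     for i in range(5):
--         top_nums = [num for num, _ in pos_freq[i].most_common(6)]
--         pools[f'pos_{i+1}'] = top_nums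
--
--     return pools
-- ===== SOURCE B (Python) =====
-- from collections import Counter
--
-- def get_position_pools(draws, window=100):
--     """Get suggested number pools per position from recent draws."""
--     recent = draws[:min(window, len(draws))]
--     pools = {}
--     for i in range(5):
--         column = [nums[i]
--                   for d in recent
--                   for nums in [sorted(d.get('main', []))]
--                   if i < len(nums)]
--         pools[f'pos_{i+1}'] = [n for n, _ in Counter(column).most_common(6)]
--     return pools
-- ===== Notes on version B (the rewrite author's own statement) =====
-- stated objective: alternative
-- what changed: B replaces A's single interleaved pass over a dict of five Counters with a per-position decomposition: for each position 0..4 it extracts that column of the sorted draws in one comprehension and takes Counter(column).most_common(6) directly.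
import Mathlib
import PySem

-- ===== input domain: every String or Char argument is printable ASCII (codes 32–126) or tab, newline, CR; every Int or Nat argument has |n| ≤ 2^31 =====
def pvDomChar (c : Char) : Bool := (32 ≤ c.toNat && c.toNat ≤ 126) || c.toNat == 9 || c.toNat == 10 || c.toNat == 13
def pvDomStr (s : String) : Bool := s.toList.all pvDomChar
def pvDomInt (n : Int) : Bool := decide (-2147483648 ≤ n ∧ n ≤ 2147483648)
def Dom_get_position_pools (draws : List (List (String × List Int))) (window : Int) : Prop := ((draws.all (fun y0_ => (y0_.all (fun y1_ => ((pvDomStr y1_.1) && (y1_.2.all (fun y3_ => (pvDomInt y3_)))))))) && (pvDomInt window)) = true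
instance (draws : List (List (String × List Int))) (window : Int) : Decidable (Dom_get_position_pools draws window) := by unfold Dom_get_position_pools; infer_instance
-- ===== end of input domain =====

-- B re-implements A by a per-position traversal (5 column passes + Counter) instead of A's single
-- interleaved pass over a dict of counters; objective: alternative decomposition, same asymptotic cost.

-- shared helpers: both Pythons compute sorted(d.get('main', [])) and call Counter.most_common(6)
-- (most_common(6) = sorted(items, key=count, reverse=True)[:6], CPython's documented equivalence)
def pvSortedMain (d : List (String × List Int)) : List Int :=
  PySem.List.sorted ((PySem.Dict.mk d).getD "main" []) (fun x => x)

def pvMostCommon6 (c : PySem.Dict Int Int) : List (Int × Int) :=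
  PySem.List.slice (PySem.List.sorted c.items (fun p => p.2) true) none (some 6)

-- ===== PORT A =====
def get_position_pools (draws : List (List (String × List Int))) (window : Int) : List (String × List Int) :=
  let w : Int := if ((draws.length : Int)) < window then ((draws.length : Int)) else window
  let recent := PySem.List.slice draws none (some w)
  let pf0 : PySem.Dict Int (PySem.Dict Int Int) :=
    (PySem.List.pyRange 0 5 1).foldl (fun d i => d.insert i PySem.Dict.empty) PySem.Dict.empty
  let pf := recent.foldl (fun pf draw =>
      (PySem.List.enumerate (pvSortedMain draw)).foldl
        (fun pf p => pf.modify p.1 PySem.Dict.empty (fun c => c.modify p.2 0 (fun v => v + 1))) pf) pf0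
  ((PySem.List.pyRange 0 5 1).foldl (fun pools i =>
      pools.insert ("pos_" ++ PySem.Int.toStr (i + 1))
        ((pvMostCommon6 (pf.getD i PySem.Dict.empty)).map (fun p => p.1))) PySem.Dict.empty).items

-- ===== PORT B =====
def get_position_pools_alt (draws : List (List (String × List Int))) (window : Int) : List (String × List Int) :=
  let recent := PySem.List.slice draws none (some (min window ((draws.length : Int))))
  ((PySem.List.pyRange 0 5 1).foldl (fun pools i =>
      let column := recent.flatMap (fun d =>
        let nums := pvSortedMain d
        if i < ((nums.length : Int)) then [PySem.List.pyGetD nums i 0] else [])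
      pools.insert ("pos_" ++ PySem.Int.toStr (i + 1))
        ((pvMostCommon6 (PySem.Dict.counter column)).map (fun p => p.1))) PySem.Dict.empty).items

-- ===== PRECONDITION & SPEC =====
-- Pre_ excludes exactly the inputs where A raises KeyError: a draw inside the recent window whose
-- 'main' list has more than 5 numbers (position index 5 is missing from A's fixed 0..4 dict).
def Pre_get_position_pools (draws : List (List (String × List Int))) (window : Int) : Prop :=
  ∀ d ∈ PySem.List.slice draws none (some (min window ((draws.length : Int)))),
    ((PySem.Dict.mk d).getD "main" []).length ≤ 5
instance (draws : List (List (String × List Int))) (window : Int) : Decidable (Pre_get_position_pools draws window) := by unfold Pre_get_position_pools; infer_instance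

def pvWitness_get_position_pools : (List (List (String × List Int))) × Int :=
  ([[("main", [3, 1, 2])], [("main", [5, 5, 4, 2, 1])], []], 100)

def Spec_get_position_pools (draws : List (List (String × List Int))) (window : Int) (out : List (String × List Int)) : Prop := out = get_position_pools_alt draws window
instance (draws : List (List (String × List Int))) (window : Int) (out : List (String × List Int)) : Decidable (Spec_get_position_pools draws window out) := by unfold Spec_get_position_pools; infer_instance

-- ===== CLAIM (what is proved, stated in full; the proofs are below) =====
def Claim_equal_get_position_pools : Prop := ∀ (draws : List (List (String × List Int))) (window : Int), Dom_get_position_pools draws window → Pre_get_position_pools draws window → Spec_get_position_pools draws window (get_position_pools draws window)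


-- ===== LEMMAS AND PROOFS =====

-- one draw of A's interleaved pass, seen at a single position key i
theorem pv_enumFold_getD (s : List Int) (n : Int) (pf : PySem.Dict Int (PySem.Dict Int Int)) (i : Int) :
    ((PySem.List.enumerate s n).foldl
        (fun pf p => pf.modify p.1 PySem.Dict.empty (fun c => c.modify p.2 0 (fun v => v + 1))) pf).getD i PySem.Dict.empty
    = if n ≤ i ∧ i < n + s.length then
        (pf.getD i PySem.Dict.empty).modify (PySem.List.pyGetD s (i - n) 0) 0 (fun v => v + 1)
      else pf.getD i PySem.Dict.empty := by
  induction s generalizing n pf with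
  | nil => simp [PySem.List.enumerate]
  | cons x t ih =>
    simp only [PySem.List.enumerate, List.foldl_cons]
    rw [ih]
    by_cases hin : i = n
    · subst hin
      have h1 : ¬ (i + 1 ≤ i ∧ i < i + 1 + t.length) := by omega
      have h2 : i ≤ i ∧ i < i + ((x :: t).length : Int) := by simp
      rw [if_neg h1, if_pos h2]
      rw [PySem.Dict.getD_modify_self]
      have : PySem.List.pyGetD (x :: t) (i - i) 0 = x := by
        simp [PySem.List.pyGetD, PySem.List.pyGet?, PySem.List.pyIdx?]
      rw [this]
    · by_cases hr : n + 1 ≤ i ∧ i < n + 1 + t.length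
      · have h2 : n ≤ i ∧ i < n + ((x :: t).length : Int) := by simp; omega
        rw [if_pos hr, if_pos h2, PySem.Dict.getD_modify_of_ne _ _ _ hin]
        have hg : PySem.List.pyGetD t (i - (n + 1)) 0 = PySem.List.pyGetD (x :: t) (i - n) 0 := by
          have hb0 : (0:Int) ≤ i - (n+1) := by omega
          have hb1 : i - (n+1) < (t.length : Int) := by omega
          rw [PySem.List.pyGetD_eq_getElem t 0 hb0 hb1,
              PySem.List.pyGetD_eq_getElem (x :: t) 0 (by omega) (by simp; omega)]
          have : (i - n).toNat = (i - (n+1)).toNat + 1 := by omega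
          simp [this]
        rw [hg]
      · have h2 : ¬ (n ≤ i ∧ i < n + ((x :: t).length : Int)) := by simp; omega
        rw [if_neg hr, if_neg h2, PySem.Dict.getD_modify_of_ne _ _ _ hin]

-- A's whole counting pass, seen at position i: it is the count-fold of B's column i
theorem pv_outerFold_getD (recent : List (List (String × List Int)))
    (pf : PySem.Dict Int (PySem.Dict Int Int)) (i : Int) (hi : 0 ≤ i) :
    (recent.foldl (fun pf draw =>
        (PySem.List.enumerate (pvSortedMain draw)).foldl
          (fun pf p => pf.modify p.1 PySem.Dict.empty (fun c => c.modify p.2 0 (fun v => v + 1))) pf) pf).getD i PySem.Dict.empty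
    = (recent.flatMap (fun d =>
          let nums := pvSortedMain d
          if i < ((nums.length : Int)) then [PySem.List.pyGetD nums i 0] else [])).foldl
        (fun c x => c.modify x 0 (fun v => v + 1)) (pf.getD i PySem.Dict.empty) := by
  induction recent generalizing pf with
  | nil => simp
  | cons d rs ih =>
    simp only [List.foldl_cons, List.flatMap_cons, List.foldl_append]
    rw [ih, pv_enumFold_getD]
    by_cases h : i < ((pvSortedMain d).length : Int)
    · rw [if_pos (by omega), if_pos h]
      simp [sub_zero]
    · rw [if_neg (by omega), if_neg h]
      simp

-- the two pools folds agree entrywise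
theorem pv_main (draws : List (List (String × List Int))) (window : Int) : get_position_pools draws window = get_position_pools_alt draws window := by
  unfold get_position_pools get_position_pools_alt
  have hw : (if ((draws.length : Int)) < window then ((draws.length : Int)) else window)
      = min window ((draws.length : Int)) := by split_ifs <;> omega
  rw [hw]
  apply congrArg PySem.Dict.items
  apply PySem.List.foldl_congr_mem
  intro pools i hi
  rw [PySem.List.mem_pyRange_one] at hi
  have h0 : ((PySem.List.pyRange 0 5 1).foldl (fun d i => d.insert i PySem.Dict.empty)
      (PySem.Dict.empty : PySem.Dict Int (PySem.Dict Int Int))).getD i PySem.Dict.empty = PySem.Dict.empty := by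
    obtain ⟨h1, h2⟩ := hi
    interval_cases i <;> rfl
  rw [pv_outerFold_getD _ _ _ hi.1, h0]
  simp only [PySem.Dict.counter_eq_foldl]

-- ===== VERDICT (by name: the statement is the Claim_ definition above) =====
theorem get_position_pools_spec : Claim_equal_get_position_pools := by
  intro draws window _ _
  unfold Spec_get_position_pools
  exact pv_main draws window
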